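-- pv_equiv track=rewrite | github.com/MrBrantCode/unitest_baseline | mut_generate/mist_train_cf/cf_36531/solution.py | manage_static_routes
-- ===== SOURCE A (Python) =====
-- def manage_static_routes(current_static_routes, last_static_routes, deleted_routes):
--     # Add new static routes from last_static_routes to current_static_routes
--     for network_id, routes in last_static_routes.items():
--         if network_id not in current_static_routes:
--             current_static_routes[network_id] = routes
--         else:
--             for cidr, dest_network_id in routes:
--                 if (cidr, dest_network_id) not in current_static_routes[network_id]:
--                     current_static_routes[network_id].append((cidr, dest_network_id))
--
--     # Remove routes specified in deleted_routes from current_static_routes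
--     for source_network_id, cidr, dest_network_id in deleted_routes:
--         if source_network_id in current_static_routes:
--             current_static_routes[source_network_id] = [(c, d) for c, d in current_static_routes[source_network_id] if (c, d) != (cidr, dest_network_id)]
--
--     # Update routes in current_static_routes that have been modified in last_static_routes
--     for network_id, routes in last_static_routes.items():
--         if network_id in current_static_routes:
--             for cidr, dest_network_id in routes:
--                 if (cidr, dest_network_id) in current_static_routes[network_id]:
--                     current_static_routes[network_id] = [(c, d) for c, d in current_static_routes[network_id] if (c, d) != (cidr, dest_network_id)]
--                     current_static_routes[network_id].append((cidr, dest_network_id))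
--
--     return current_static_routes
-- ===== SOURCE B (Python) =====
-- def manage_static_routes(current_static_routes, last_static_routes, deleted_routes):
--     # One merge pass: per network, keep non-last routes in place, then append the
--     # last-routes deduplicated keeping the LAST occurrence; then one deletion pass.
--     for network_id, routes in last_static_routes.items():
--         route_set = set(routes)
--         front = [r for r in current_static_routes.get(network_id, []) if r not in route_set]
--         tail = list(dict.fromkeys(reversed(routes)))[::-1]
--         current_static_routes[network_id] = front + tail
--     for source_network_id, cidr, dest_network_id in deleted_routes:
--         if source_network_id in current_static_routes:
--             current_static_routes[source_network_id] = [r for r in current_static_routes[source_network_id] if r != (cidr, dest_network_id)]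
--     return current_static_routes
-- ===== Notes on version B (the rewrite author's own statement) =====
-- stated objective: alternative
-- what changed: B replaces A's three passes over last_static_routes (append-missing merge, delete, then per-route move-to-end reorder) by a single merge pass that builds each network's list directly as kept-existing-routes ++ last-routes-deduplicated-keeping-last-occurrence, followed by the one deletion pass.
import Mathlib
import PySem

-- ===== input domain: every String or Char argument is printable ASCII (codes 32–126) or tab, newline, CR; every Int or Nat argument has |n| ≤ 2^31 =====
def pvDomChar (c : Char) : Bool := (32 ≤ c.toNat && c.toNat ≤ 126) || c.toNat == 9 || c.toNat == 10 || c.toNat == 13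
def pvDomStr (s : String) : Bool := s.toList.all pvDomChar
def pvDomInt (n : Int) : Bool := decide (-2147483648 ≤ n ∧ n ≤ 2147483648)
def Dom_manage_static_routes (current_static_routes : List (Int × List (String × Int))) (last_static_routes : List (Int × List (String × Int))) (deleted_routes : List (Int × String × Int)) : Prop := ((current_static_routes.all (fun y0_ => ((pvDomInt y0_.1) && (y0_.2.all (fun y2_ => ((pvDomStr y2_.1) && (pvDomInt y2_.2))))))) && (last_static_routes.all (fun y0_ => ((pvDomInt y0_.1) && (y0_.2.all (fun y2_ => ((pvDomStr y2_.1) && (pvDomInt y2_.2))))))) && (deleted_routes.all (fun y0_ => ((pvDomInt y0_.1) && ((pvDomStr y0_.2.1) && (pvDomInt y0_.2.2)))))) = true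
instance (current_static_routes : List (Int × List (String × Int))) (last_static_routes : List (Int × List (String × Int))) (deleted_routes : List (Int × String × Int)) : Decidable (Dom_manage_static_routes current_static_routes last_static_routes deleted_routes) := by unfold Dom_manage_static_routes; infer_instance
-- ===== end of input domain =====

-- B merges each network in one pass (kept existing routes ++ last routes deduped keeping the
-- last occurrence) instead of A's merge + reorder passes; deletions stay one pass. Return-value
-- equivalence only: both Pythons mutate current_static_routes in place.


-- Shared dict-as-association-list primitives (Python dict: membership, lookup, overwrite in place).
def pvHas (d : List (Int × List (String × Int))) (k : Int) : Bool := d.any (fun p => p.1 == k)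
def pvGet? (d : List (Int × List (String × Int))) (k : Int) : Option (List (String × Int)) := (d.find? (fun p => p.1 == k)).map (·.2)
def pvGetD (d : List (Int × List (String × Int))) (k : Int) : List (String × Int) := (pvGet? d k).getD []
def pvSet (d : List (Int × List (String × Int))) (k : Int) (v : List (String × Int)) : List (Int × List (String × Int)) := d.map (fun p => if p.1 == k then (p.1, v) else p)

-- ===== PORT A =====
-- phase 1: append routes missing from current[network_id] (new networks are appended whole)
def pvAddMissing (l : List (String × Int)) (rs : List (String × Int)) : List (String × Int) :=
  rs.foldl (fun acc r => if acc.contains r then acc else acc ++ [r]) l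
def pvStepNew (c : List (Int × List (String × Int))) (kr : Int × List (String × Int)) : List (Int × List (String × Int)) :=
  if pvHas c kr.1 then pvSet c kr.1 (pvAddMissing (pvGetD c kr.1) kr.2) else c ++ [kr]
-- phase 2: delete one (cidr, dest) pair from one network's list
def pvStepDel (c : List (Int × List (String × Int))) (t : Int × String × Int) : List (Int × List (String × Int)) :=
  if pvHas c t.1 then pvSet c t.1 ((pvGetD c t.1).filter (fun p => !(p == t.2))) else c
-- phase 3: move each still-present last-route to the end of its network's list
def pvMoveStep (k : Int) (c : List (Int × List (String × Int))) (r : String × Int) : List (Int × List (String × Int)) :=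
  if (pvGetD c k).contains r then pvSet c k ((pvGetD c k).filter (fun p => !(p == r)) ++ [r]) else c
def pvStepMove (c : List (Int × List (String × Int))) (kr : Int × List (String × Int)) : List (Int × List (String × Int)) :=
  if pvHas c kr.1 then kr.2.foldl (pvMoveStep kr.1) c else c

def manage_static_routes (current_static_routes : List (Int × List (String × Int))) (last_static_routes : List (Int × List (String × Int))) (deleted_routes : List (Int × String × Int)) : List (Int × List (String × Int)) :=
  last_static_routes.foldl pvStepMove
    (deleted_routes.foldl pvStepDel
      (last_static_routes.foldl pvStepNew current_static_routes))

-- ===== PORT B =====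
-- d[k] = v : overwrite in place if the key exists, else append
def pvSetItem (d : List (Int × List (String × Int))) (k : Int) (v : List (String × Int)) : List (Int × List (String × Int)) :=
  if pvHas d k then pvSet d k v else d ++ [(k, v)]
-- front = existing routes not in set(routes); tail = routes deduped keeping the LAST occurrence
def pvFrontTail (existing : List (String × Int)) (rs : List (String × Int)) : List (String × Int) :=
  existing.filter (fun r => !(PySem.Set.contains (PySem.Set.ofList rs) r)) ++ (PySem.List.dedup rs.reverse).reverse
def pvStepMerge (c : List (Int × List (String × Int))) (kr : Int × List (String × Int)) : List (Int × List (String × Int)) :=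
  pvSetItem c kr.1 (pvFrontTail (pvGetD c kr.1) kr.2)

def manage_static_routes_alt (current_static_routes : List (Int × List (String × Int))) (last_static_routes : List (Int × List (String × Int))) (deleted_routes : List (Int × String × Int)) : List (Int × List (String × Int)) :=
  deleted_routes.foldl pvStepDel (last_static_routes.foldl pvStepMerge current_static_routes)

-- ===== PRECONDITION & SPEC =====
-- Pre_ excludes association lists with duplicate network ids: those do not represent any Python
-- dict input (Python collapses duplicate keys before the call), so nothing is claimed there.
def Pre_manage_static_routes (current_static_routes : List (Int × List (String × Int))) (last_static_routes : List (Int × List (String × Int))) (deleted_routes : List (Int × String × Int)) : Prop :=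
  (current_static_routes.map (·.1)).Nodup ∧ (last_static_routes.map (·.1)).Nodup
instance (current_static_routes : List (Int × List (String × Int))) (last_static_routes : List (Int × List (String × Int))) (deleted_routes : List (Int × String × Int)) : Decidable (Pre_manage_static_routes current_static_routes last_static_routes deleted_routes) := by unfold Pre_manage_static_routes; infer_instance
def pvWitness_manage_static_routes : (List (Int × List (String × Int))) × (List (Int × List (String × Int))) × (List (Int × String × Int)) :=
  ([(1, [("10.0.0.0/24", 2)])], [(1, [("10.0.0.0/24", 2), ("10.0.1.0/24", 3)]), (4, [("10.0.2.0/24", 1)])], [(1, "10.0.1.0/24", 3)])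
def Spec_manage_static_routes (current_static_routes : List (Int × List (String × Int))) (last_static_routes : List (Int × List (String × Int))) (deleted_routes : List (Int × String × Int)) (out : List (Int × List (String × Int))) : Prop := out = manage_static_routes_alt current_static_routes last_static_routes deleted_routes
instance (current_static_routes : List (Int × List (String × Int))) (last_static_routes : List (Int × List (String × Int))) (deleted_routes : List (Int × String × Int)) (out : List (Int × List (String × Int))) : Decidable (Spec_manage_static_routes current_static_routes last_static_routes deleted_routes out) := by unfold Spec_manage_static_routes; infer_instance

-- ===== CLAIM (what is proved, stated in full; the proofs are below) =====
def Claim_equal_manage_static_routes : Prop := ∀ (current_static_routes : List (Int × List (String × Int))) (last_static_routes : List (Int × List (String × Int))) (deleted_routes : List (Int × String × Int)), Dom_manage_static_routes current_static_routes last_static_routes deleted_routes → Pre_manage_static_routes current_static_routes last_static_routes deleted_routes → Spec_manage_static_routes current_static_routes last_static_routes deleted_routes (manage_static_routes current_static_routes last_static_routes deleted_routes)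


-- ===== LEMMAS AND PROOFS =====

theorem pvwitness_ok : Dom_manage_static_routes (pvWitness_manage_static_routes.1) (pvWitness_manage_static_routes.2.1) (pvWitness_manage_static_routes.2.2) ∧ Pre_manage_static_routes (pvWitness_manage_static_routes.1) (pvWitness_manage_static_routes.2.1) (pvWitness_manage_static_routes.2.2) := by
  constructor <;> decide

-- ---- association-list basics ----

theorem pvGet?_cons (p : Int × List (String × Int)) (d : List (Int × List (String × Int))) (j : Int) :
    pvGet? (p :: d) j = if p.1 = j then some p.2 else pvGet? d j := by
  unfold pvGet?
  by_cases h : p.1 = j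
  · rw [List.find?_cons_of_pos (by simpa using h), if_pos h]
    rfl
  · rw [List.find?_cons_of_neg (by simpa using h), if_neg h]

theorem pvHas_eq (d : List (Int × List (String × Int))) (k : Int) : pvHas d k = (pvGet? d k).isSome := by
  induction d with
  | nil => rfl
  | cons p d ih =>
    simp only [pvHas, List.any_cons] at ih ⊢
    rw [pvGet?_cons]
    by_cases h : p.1 = k
    · simp [h]
    · have hb : (p.1 == k) = false := by simpa using h
      simp [hb, h, ih]

theorem pvHas_iff (d : List (Int × List (String × Int))) (k : Int) : pvHas d k = true ↔ k ∈ d.map (·.1) := by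
  simp only [pvHas, List.any_eq_true, List.mem_map, beq_iff_eq]

theorem get?_none_of_not_has (c : List (Int × List (String × Int))) (x : Int) (hh : ¬ pvHas c x = true) : pvGet? c x = none := by
  cases hg : pvGet? c x with
  | none => rfl
  | some v => exact absurd (by rw [pvHas_eq, hg]; rfl) hh

theorem find?_none_of_not_has (c : List (Int × List (String × Int))) (x : Int) (hh : ¬ pvHas c x = true) :
    c.find? (fun p => p.1 == x) = none := by
  have h := get?_none_of_not_has c x hh
  unfold pvGet? at h
  cases hf : c.find? (fun p => p.1 == x) with
  | none => rfl
  | some p => rw [hf] at h; simp at h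

theorem pvGet?_none (d : List (Int × List (String × Int))) (k : Int) (h : k ∉ d.map (·.1)) : pvGet? d k = none := by
  apply get?_none_of_not_has
  intro hc
  exact h ((pvHas_iff d k).mp hc)

theorem keys_pvSet (d : List (Int × List (String × Int))) (k : Int) (v : List (String × Int)) : (pvSet d k v).map (·.1) = d.map (·.1) := by
  simp only [pvSet, List.map_map]
  apply List.map_congr_left
  intro p _
  by_cases h : p.1 = k <;> simp [h]

theorem pvGet?_pvSet (d : List (Int × List (String × Int))) (k : Int) (v : List (String × Int)) (j : Int) :
    pvGet? (pvSet d k v) j = if j = k then (pvGet? d k).map (fun _ => v) else pvGet? d j := by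
  induction d with
  | nil => simp only [pvSet, List.map_nil, pvGet?, List.find?_nil, Option.map_none]; split <;> rfl
  | cons p d ih =>
    simp only [pvSet, List.map_cons]
    by_cases hpk : p.1 = k
    · rw [show (if p.1 == k then (p.1, v) else p) = (p.1, v) from by simp [hpk]]
      rw [pvGet?_cons, pvGet?_cons, pvGet?_cons]
      simp only [pvSet] at ih
      rw [ih]
      by_cases hjk : j = k <;> by_cases hpj : p.1 = j <;> simp_all
    · rw [show (if p.1 == k then (p.1, v) else p) = p from by simp [hpk]]
      rw [pvGet?_cons, pvGet?_cons, pvGet?_cons]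
      simp only [pvSet] at ih
      rw [ih]
      by_cases hjk : j = k <;> by_cases hpj : p.1 = j <;> simp_all

theorem pvGetD_eq (d : List (Int × List (String × Int))) (k : Int) : pvGetD d k = (pvGet? d k).getD [] := rfl

-- ---- generic per-key characterisation of a fold over last_static_routes ----

theorem pvFoldGet_not_mem (s : List (Int × List (String × Int)) → (Int × List (String × Int)) → List (Int × List (String × Int)))
    (hne : ∀ c kr j, j ≠ kr.1 → pvGet? (s c kr) j = pvGet? c j) :
    ∀ (l : List (Int × List (String × Int))) (c : List (Int × List (String × Int))) (j : Int), j ∉ l.map (·.1) →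
      pvGet? (l.foldl s c) j = pvGet? c j := by
  intro l
  induction l with
  | nil => intro c j _; rfl
  | cons kr l ih =>
    intro c j hj
    simp only [List.map_cons, List.mem_cons, not_or] at hj
    rw [List.foldl_cons, ih _ _ hj.2, hne c kr j hj.1]

theorem pvFoldGet (s : List (Int × List (String × Int)) → (Int × List (String × Int)) → List (Int × List (String × Int)))
    (V : Option (List (String × Int)) → (Int × List (String × Int)) → Option (List (String × Int)))
    (hne : ∀ c kr j, j ≠ kr.1 → pvGet? (s c kr) j = pvGet? c j)
    (hself : ∀ c kr, pvGet? (s c kr) kr.1 = V (pvGet? c kr.1) kr) :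
    ∀ (l : List (Int × List (String × Int))) (c : List (Int × List (String × Int))) (j : Int), (l.map (·.1)).Nodup →
      pvGet? (l.foldl s c) j = (match l.find? (fun kr => kr.1 == j) with
        | none => pvGet? c j
        | some kr => V (pvGet? c j) kr) := by
  intro l
  induction l with
  | nil => intro c j _; rfl
  | cons kr l ih =>
    intro c j hnd
    simp only [List.map_cons, List.nodup_cons] at hnd
    rw [List.foldl_cons]
    by_cases hkj : kr.1 = j
    · rw [List.find?_cons_of_pos (by simpa using hkj)]
      have hmem : j ∉ l.map (·.1) := by rw [← hkj]; exact hnd.1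
      rw [pvFoldGet_not_mem s hne l _ j hmem, ← hkj]
      exact hself c kr
    · rw [List.find?_cons_of_neg (by simpa using hkj)]
      rw [ih _ j hnd.2, hne c kr j (fun h => hkj h.symm)]

-- ---- per-key values of the individual steps ----

theorem get?_stepNew_ne (c : List (Int × List (String × Int))) (kr : Int × List (String × Int)) (j : Int) (h : j ≠ kr.1) :
    pvGet? (pvStepNew c kr) j = pvGet? c j := by
  unfold pvStepNew
  split
  · rw [pvGet?_pvSet, if_neg h]
  · rw [show c ++ [kr] = c ++ kr :: [] from rfl]
    unfold pvGet?
    rw [List.find?_append, List.find?_cons_of_neg (by simp only [beq_iff_eq]; exact fun h' => h h'.symm), List.find?_nil, Option.or_none]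

theorem get?_stepNew_self (c : List (Int × List (String × Int))) (kr : Int × List (String × Int)) :
    pvGet? (pvStepNew c kr) kr.1 =
      some (match pvGet? c kr.1 with | some v => pvAddMissing v kr.2 | none => kr.2) := by
  unfold pvStepNew
  split
  next hh =>
    rw [pvGet?_pvSet, if_pos rfl]
    obtain ⟨v, hv⟩ := Option.isSome_iff_exists.mp (by rw [← pvHas_eq]; exact hh)
    rw [hv]
    simp [pvGetD_eq, hv]
  next hh =>
    rw [get?_none_of_not_has c kr.1 hh]
    unfold pvGet?
    rw [List.find?_append, find?_none_of_not_has c kr.1 hh, Option.none_or,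
      List.find?_cons_of_pos (by show (kr.1 == kr.1) = true; simp)]
    rfl

theorem get?_stepMerge_ne (c : List (Int × List (String × Int))) (kr : Int × List (String × Int)) (j : Int) (h : j ≠ kr.1) :
    pvGet? (pvStepMerge c kr) j = pvGet? c j := by
  unfold pvStepMerge pvSetItem
  split
  · rw [pvGet?_pvSet, if_neg h]
  · unfold pvGet?
    rw [List.find?_append, List.find?_cons_of_neg (by show ¬ ((kr.1 == j) = true); simp only [beq_iff_eq]; exact fun h' => h h'.symm), List.find?_nil, Option.or_none]

theorem get?_stepMerge_self (c : List (Int × List (String × Int))) (kr : Int × List (String × Int)) :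
    pvGet? (pvStepMerge c kr) kr.1 = some (pvFrontTail ((pvGet? c kr.1).getD []) kr.2) := by
  unfold pvStepMerge pvSetItem
  split
  next hh =>
    rw [pvGet?_pvSet, if_pos rfl]
    obtain ⟨v, hv⟩ := Option.isSome_iff_exists.mp (by rw [← pvHas_eq]; exact hh)
    rw [hv]
    simp [pvGetD_eq, hv]
  next hh =>
    rw [get?_none_of_not_has c kr.1 hh, pvGetD_eq, get?_none_of_not_has c kr.1 hh]
    unfold pvGet?
    rw [List.find?_append, find?_none_of_not_has c kr.1 hh, Option.none_or,
      List.find?_cons_of_pos (by show (kr.1 == kr.1) = true; simp)]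
    rfl

-- the reorder loop of A's third phase, as a pure list function
def pvReorder (v : List (String × Int)) (rs : List (String × Int)) : List (String × Int) :=
  rs.foldl (fun l r => if l.contains r then l.filter (fun p => !(p == r)) ++ [r] else l) v

theorem reorder_cons (l : List (String × Int)) (r : String × Int) (rs : List (String × Int)) :
    pvReorder l (r :: rs) = pvReorder (if l.contains r then l.filter (fun p => !(p == r)) ++ [r] else l) rs := rfl

theorem moveInner_ne : ∀ (rs : List (String × Int)) (c : List (Int × List (String × Int))) (k j : Int), j ≠ k →
    pvGet? (rs.foldl (pvMoveStep k) c) j = pvGet? c j := by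
  intro rs
  induction rs with
  | nil => intro c k j _; rfl
  | cons r rs ih =>
    intro c k j hj
    rw [List.foldl_cons, ih _ k j hj]
    unfold pvMoveStep
    split
    · rw [pvGet?_pvSet, if_neg hj]
    · rfl

theorem moveInner_self : ∀ (rs : List (String × Int)) (c : List (Int × List (String × Int))) (k : Int) (v : List (String × Int)),
    pvGet? c k = some v →
    pvGet? (rs.foldl (pvMoveStep k) c) k = some (pvReorder v rs) := by
  intro rs
  induction rs with
  | nil => intro c k v hv; simpa [pvReorder] using hv
  | cons r rs ih =>
    intro c k v hv
    have hget : pvGetD c k = v := by rw [pvGetD_eq, hv]; rfl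
    rw [List.foldl_cons, reorder_cons]
    have hstep : pvMoveStep k c r = if v.contains r then pvSet c k (v.filter (fun p => !(p == r)) ++ [r]) else c := by
      unfold pvMoveStep
      rw [hget]
    rw [hstep]
    by_cases hc : v.contains r
    · rw [if_pos hc, if_pos hc]
      apply ih
      rw [pvGet?_pvSet, if_pos rfl, hv]
      rfl
    · rw [if_neg hc, if_neg hc]
      exact ih c k v hv

theorem get?_stepMove_ne (c : List (Int × List (String × Int))) (kr : Int × List (String × Int)) (j : Int) (h : j ≠ kr.1) :
    pvGet? (pvStepMove c kr) j = pvGet? c j := by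
  unfold pvStepMove
  split
  · exact moveInner_ne kr.2 c kr.1 j h
  · rfl

theorem get?_stepMove_self (c : List (Int × List (String × Int))) (kr : Int × List (String × Int)) :
    pvGet? (pvStepMove c kr) kr.1 = (pvGet? c kr.1).map (fun v => pvReorder v kr.2) := by
  unfold pvStepMove
  split
  next hh =>
    obtain ⟨v, hv⟩ := Option.isSome_iff_exists.mp (by rw [← pvHas_eq]; exact hh)
    rw [moveInner_self kr.2 c kr.1 v hv, hv]
    rfl
  next hh =>
    rw [get?_none_of_not_has c kr.1 hh]
    rfl

-- ---- the deletion pass, per key ----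

theorem get?_stepDel_ne (c : List (Int × List (String × Int))) (t : Int × String × Int) (j : Int) (h : j ≠ t.1) :
    pvGet? (pvStepDel c t) j = pvGet? c j := by
  unfold pvStepDel
  split
  · rw [pvGet?_pvSet, if_neg h]
  · rfl

theorem get?_stepDel_self (c : List (Int × List (String × Int))) (t : Int × String × Int) :
    pvGet? (pvStepDel c t) t.1 = (pvGet? c t.1).map (fun v => v.filter (fun p => !(p == t.2))) := by
  unfold pvStepDel
  split
  next ht =>
    rw [pvGet?_pvSet, if_pos rfl]
    obtain ⟨v, hv⟩ := Option.isSome_iff_exists.mp (by rw [← pvHas_eq]; exact ht)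
    rw [hv]
    simp [pvGetD_eq, hv]
  next ht =>
    rw [get?_none_of_not_has c t.1 ht]
    rfl

theorem pvDelGet : ∀ (del : List (Int × String × Int)) (c : List (Int × List (String × Int))) (j : Int),
    pvGet? (del.foldl pvStepDel c) j =
      (pvGet? c j).map (fun v => v.filter (fun p => !(del.any (fun t => t.1 == j && t.2 == p)))) := by
  intro del
  induction del with
  | nil => intro c j; cases h : pvGet? c j <;> simp [h]
  | cons t del ih =>
    intro c j
    rw [List.foldl_cons, ih]
    by_cases hj : j = t.1
    · subst hj
      rw [get?_stepDel_self, Option.map_map]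
      cases hg : pvGet? c t.1 with
      | none => rfl
      | some v =>
        simp only [Option.map_some, Option.some.injEq, Function.comp, List.filter_filter]
        apply List.filter_congr
        intro p _
        have hcomm : (t.2 == p) = (p == t.2) := BEq.comm
        simp only [List.any_cons, beq_self_eq_true, Bool.true_and, Bool.not_or, hcomm]
        exact Bool.and_comm _ _
    · rw [get?_stepDel_ne c t j hj]
      cases hg : pvGet? c j with
      | none => rfl
      | some v =>
        simp only [Option.map_some, Option.some.injEq]
        apply List.filter_congr
        intro p _
        have hb : (t.1 == j) = false := by simp only [beq_eq_false_iff_ne, ne_eq]; exact fun h => hj h.symm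
        simp [List.any_cons, hb]

-- ---- keys of the phases ----

def pvKf (ks : List Int) (kr : Int × List (String × Int)) : List Int := if kr.1 ∈ ks then ks else ks ++ [kr.1]

theorem keys_stepNew (c : List (Int × List (String × Int))) (kr : Int × List (String × Int)) :
    (pvStepNew c kr).map (·.1) = pvKf (c.map (·.1)) kr := by
  unfold pvStepNew pvKf
  by_cases h : pvHas c kr.1
  · rw [if_pos h, keys_pvSet, if_pos ((pvHas_iff c kr.1).mp h)]
  · rw [if_neg h, if_neg (fun hm => h ((pvHas_iff c kr.1).mpr hm))]
    simp

theorem keys_stepMerge (c : List (Int × List (String × Int))) (kr : Int × List (String × Int)) :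
    (pvStepMerge c kr).map (·.1) = pvKf (c.map (·.1)) kr := by
  unfold pvStepMerge pvSetItem pvKf
  by_cases h : pvHas c kr.1
  · rw [if_pos h, keys_pvSet, if_pos ((pvHas_iff c kr.1).mp h)]
  · rw [if_neg h, if_neg (fun hm => h ((pvHas_iff c kr.1).mpr hm))]
    simp

theorem keys_foldNew : ∀ (l : List (Int × List (String × Int))) (c : List (Int × List (String × Int))),
    (l.foldl pvStepNew c).map (·.1) = l.foldl pvKf (c.map (·.1)) := by
  intro l
  induction l with
  | nil => intro c; rfl
  | cons kr l ih => intro c; rw [List.foldl_cons, List.foldl_cons, ih, keys_stepNew]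

theorem keys_foldMerge : ∀ (l : List (Int × List (String × Int))) (c : List (Int × List (String × Int))),
    (l.foldl pvStepMerge c).map (·.1) = l.foldl pvKf (c.map (·.1)) := by
  intro l
  induction l with
  | nil => intro c; rfl
  | cons kr l ih => intro c; rw [List.foldl_cons, List.foldl_cons, ih, keys_stepMerge]

theorem keys_foldDel : ∀ (del : List (Int × String × Int)) (c : List (Int × List (String × Int))),
    (del.foldl pvStepDel c).map (·.1) = c.map (·.1) := by
  intro del
  induction del with
  | nil => intro c; rfl
  | cons t del ih =>
    intro c
    rw [List.foldl_cons, ih]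
    unfold pvStepDel
    split
    · rw [keys_pvSet]
    · rfl

theorem keys_moveInner : ∀ (rs : List (String × Int)) (c : List (Int × List (String × Int))) (k : Int),
    (rs.foldl (pvMoveStep k) c).map (·.1) = c.map (·.1) := by
  intro rs
  induction rs with
  | nil => intro c k; rfl
  | cons r rs ih =>
    intro c k
    rw [List.foldl_cons, ih]
    unfold pvMoveStep
    split
    · rw [keys_pvSet]
    · rfl

theorem keys_foldMove : ∀ (l : List (Int × List (String × Int))) (c : List (Int × List (String × Int))),
    (l.foldl pvStepMove c).map (·.1) = c.map (·.1) := by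
  intro l
  induction l with
  | nil => intro c; rfl
  | cons kr l ih =>
    intro c
    rw [List.foldl_cons, ih]
    unfold pvStepMove
    split
    · rw [keys_moveInner]
    · rfl

theorem nodup_foldKf : ∀ (l : List (Int × List (String × Int))) (ks : List Int), ks.Nodup → (l.foldl pvKf ks).Nodup := by
  intro l
  induction l with
  | nil => intro ks h; exact h
  | cons kr l ih =>
    intro ks h
    rw [List.foldl_cons]
    apply ih
    unfold pvKf
    split
    · exact h
    · next hm =>
      exact h.append (List.nodup_singleton _)
        (by intro a ha hb; rw [List.mem_singleton] at hb; subst hb; exact hm ha)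

-- ---- extensionality for association lists with equal nodup key sequences ----

theorem pvExt : ∀ (d e : List (Int × List (String × Int))), d.map (·.1) = e.map (·.1) → (d.map (·.1)).Nodup →
    (∀ j, pvGet? d j = pvGet? e j) → d = e := by
  intro d
  induction d with
  | nil =>
    intro e hk _ _
    cases e with
    | nil => rfl
    | cons q e => simp at hk
  | cons p d ih =>
    intro e hk hnd hg
    cases e with
    | nil => simp at hk
    | cons q e =>
      simp only [List.map_cons, List.cons.injEq] at hk
      obtain ⟨hk1, hk2⟩ := hk
      simp only [List.map_cons, List.nodup_cons] at hnd
      have hv : p.2 = q.2 := by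
        have h := hg p.1
        rw [pvGet?_cons, pvGet?_cons, if_pos rfl, if_pos hk1.symm] at h
        simpa using h
      have hpq : p = q := Prod.ext hk1 hv
      have htl : d = e := by
        apply ih e hk2 hnd.2
        intro j
        by_cases hj : j = p.1
        · subst hj
          rw [pvGet?_none d p.1 hnd.1, pvGet?_none e p.1 (by rw [← hk2]; exact hnd.1)]
        · have h := hg j
          rw [pvGet?_cons, pvGet?_cons, if_neg (fun h' => hj h'.symm), if_neg (by rw [← hk1]; exact fun h' => hj h'.symm)] at h
          exact h
      rw [hpq, htl]

-- ---- list-level facts: add-missing, dedup-keeping-last, reorder ----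

theorem am_cons (l : List (String × Int)) (r : String × Int) (rs : List (String × Int)) :
    pvAddMissing l (r :: rs) = pvAddMissing (if l.contains r then l else l ++ [r]) rs := rfl

theorem am_struct : ∀ (rs l : List (String × Int)), ∃ t, pvAddMissing l rs = l ++ t ∧ ∀ x ∈ t, x ∈ rs := by
  intro rs
  induction rs with
  | nil => intro l; exact ⟨[], by simp [pvAddMissing], by simp⟩
  | cons r rs ih =>
    intro l
    rw [am_cons]
    by_cases hc : l.contains r
    · rw [if_pos hc]
      obtain ⟨t, h1, h2⟩ := ih l
      exact ⟨t, h1, fun x hx => List.mem_cons_of_mem r (h2 x hx)⟩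
    · rw [if_neg hc]
      obtain ⟨t, h1, h2⟩ := ih (l ++ [r])
      refine ⟨r :: t, ?_, ?_⟩
      · rw [h1, List.append_assoc]
        rfl
      · intro x hx
        rcases List.mem_cons.mp hx with h | h
        · subst h; exact List.mem_cons_self ..
        · exact List.mem_cons_of_mem r (h2 x h)

theorem am_mem : ∀ (rs l : List (String × Int)) (x : String × Int), x ∈ pvAddMissing l rs ↔ x ∈ l ∨ x ∈ rs := by
  intro rs
  induction rs with
  | nil => intro l x; simp [pvAddMissing]
  | cons r rs ih =>
    intro l x
    rw [am_cons]
    by_cases hc : l.contains r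
    · rw [if_pos hc, ih l x]
      have hr : r ∈ l := List.contains_iff_mem.mp hc
      simp only [List.mem_cons]
      constructor
      · rintro (h | h)
        · exact Or.inl h
        · exact Or.inr (Or.inr h)
      · rintro (h | h | h)
        · exact Or.inl h
        · exact Or.inl (h ▸ hr)
        · exact Or.inr h
    · rw [if_neg hc, ih (l ++ [r]) x]
      simp only [List.mem_append, List.mem_singleton, List.mem_cons]
      tauto

theorem am_filter (rs l : List (String × Int)) :
    (pvAddMissing l rs).filter (fun p => !(rs.contains p)) = l.filter (fun p => !(rs.contains p)) := by
  obtain ⟨t, h1, h2⟩ := am_struct rs l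
  rw [h1, List.filter_append]
  have ht : t.filter (fun p => !(rs.contains p)) = [] := by
    apply List.filter_eq_nil_iff.mpr
    intro x hx
    simp [List.contains_eq_mem, h2 x hx]
  rw [ht, List.append_nil]

-- dedup keeping the LAST occurrence (B's tail)
def pvDl (rs : List (String × Int)) : List (String × Int) := (PySem.List.dedup rs.reverse).reverse

theorem dl_cons (r : String × Int) (rs : List (String × Int)) :
    pvDl (r :: rs) = if rs.contains r then pvDl rs else r :: pvDl rs := by
  unfold pvDl
  rw [show (r :: rs).reverse = rs.reverse ++ [r] from by simp]
  rw [PySem.List.dedup_eq_ofList, PySem.List.dedup_eq_ofList, PySem.Set.ofList_eq_foldl, List.foldl_append, ← PySem.Set.ofList_eq_foldl]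
  rw [show List.foldl PySem.Set.add (PySem.Set.ofList rs.reverse) [r] = PySem.Set.add (PySem.Set.ofList rs.reverse) r from rfl]
  rw [show PySem.Set.add (PySem.Set.ofList rs.reverse) r =
      (if (PySem.Set.ofList rs.reverse).contains r = true then PySem.Set.ofList rs.reverse else PySem.Set.ofList rs.reverse ++ [r]) from rfl]
  by_cases hm : r ∈ rs
  · rw [if_pos ((PySem.Set.contains_iff _ _).mpr ((PySem.Set.mem_ofList _ _).mpr (List.mem_reverse.mpr hm))),
      if_pos (by rw [List.contains_eq_mem]; simp [hm])]
  · rw [if_neg (fun h => hm (List.mem_reverse.mp ((PySem.Set.mem_ofList _ _).mp ((PySem.Set.contains_iff _ _).mp h)))),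
      if_neg (by rw [List.contains_eq_mem]; simp [hm])]
    simp

theorem dl_mem (rs : List (String × Int)) (x : String × Int) : x ∈ pvDl rs ↔ x ∈ rs := by
  unfold pvDl
  rw [List.mem_reverse, PySem.List.mem_dedup, List.mem_reverse]

-- A's reorder loop, characterised: untouched routes keep their order in front, the
-- last-routes present in l land at the end deduplicated keeping the last occurrence.
theorem reorder_eq : ∀ (rs l : List (String × Int)),
    pvReorder l rs = l.filter (fun p => !(rs.contains p)) ++ (pvDl rs).filter (fun p => l.contains p) := by
  intro rs
  induction rs with
  | nil =>
    intro l
    show l = _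
    simp [pvDl, PySem.List.dedup_eq_ofList]
  | cons r rs ih =>
    intro l
    rw [reorder_cons, dl_cons]
    by_cases hl : r ∈ l
    · rw [if_pos (List.contains_iff_mem.mpr hl)]
      rw [ih]
      have hmem : ∀ x : String × Int, ((l.filter (fun p => !(p == r)) ++ [r]).contains x) = l.contains x := by
        intro x
        rw [List.contains_eq_mem, List.contains_eq_mem]
        apply decide_eq_decide.mpr
        by_cases hx : x = r
        · subst hx; simp [hl]
        · simp [List.mem_append, List.mem_filter, hx, beq_iff_eq]
      have hsecond : (pvDl rs).filter (fun p => (l.filter (fun p => !(p == r)) ++ [r]).contains p) =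
          (pvDl rs).filter (fun p => l.contains p) :=
        List.filter_congr (fun x _ => hmem x)
      rw [hsecond]
      have hfirst : (l.filter (fun p => !(p == r)) ++ [r]).filter (fun p => !(rs.contains p)) =
          l.filter (fun p => !((r :: rs).contains p)) ++ (if rs.contains r then [] else [r]) := by
        rw [List.filter_append, List.filter_filter]
        congr 1
        · apply List.filter_congr
          intro x _
          by_cases hxr : x = r <;> by_cases hxrs : x ∈ rs <;>
            simp [List.contains_eq_mem, hxr, hxrs, beq_iff_eq]
        · by_cases hr' : r ∈ rs <;> simp [List.contains_eq_mem, hr']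
      rw [hfirst]
      by_cases hr : r ∈ rs
      · rw [if_pos (List.contains_iff_mem.mpr hr), if_pos (List.contains_iff_mem.mpr hr)]
        simp
      · rw [if_neg (fun h => hr (List.contains_iff_mem.mp h)), if_neg (fun h => hr (List.contains_iff_mem.mp h))]
        rw [List.filter_cons_of_pos (by rw [List.contains_eq_mem]; simp [hl])]
        simp
    · rw [if_neg (fun h => hl (List.contains_iff_mem.mp h))]
      rw [ih]
      have hfr : l.filter (fun p => !(rs.contains p)) = l.filter (fun p => !((r :: rs).contains p)) := by
        apply List.filter_congr
        intro x hx
        have hxr : x ≠ r := fun h => hl (h ▸ hx)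
        simp [List.contains_eq_mem, hxr]
      rw [hfr]
      by_cases hr : r ∈ rs
      · rw [if_pos (List.contains_iff_mem.mpr hr)]
      · rw [if_neg (fun h => hr (List.contains_iff_mem.mp h))]
        rw [List.filter_cons_of_neg (by rw [List.contains_eq_mem]; simp [hl])]

-- B's per-network list, expanded
theorem ft_expand (v rs : List (String × Int)) :
    pvFrontTail v rs = v.filter (fun p => !(rs.contains p)) ++ pvDl rs := by
  unfold pvFrontTail pvDl
  congr 1
  apply List.filter_congr
  intro x _
  congr 1
  simp only [PySem.Set.contains_eq_listContains]
  by_cases hx : x ∈ rs <;> simp [List.contains_iff_mem, PySem.Set.mem_ofList, hx]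

-- filters commute / combine
theorem filter_comm' (l : List (String × Int)) (p q : (String × Int) → Bool) :
    (l.filter p).filter q = (l.filter q).filter p := by
  rw [List.filter_filter, List.filter_filter]
  apply List.filter_congr
  intro x _
  rw [Bool.and_comm]

-- ---- the per-key value of each whole program ----

theorem mainGet (cur last : List (Int × List (String × Int))) (del : List (Int × String × Int))
    (hl : (last.map (·.1)).Nodup) (j : Int) :
    pvGet? (manage_static_routes cur last del) j = pvGet? (manage_static_routes_alt cur last del) j := by
  unfold manage_static_routes manage_static_routes_alt
  rw [pvFoldGet pvStepMove (fun v? kr => v?.map (fun v => pvReorder v kr.2)) get?_stepMove_ne get?_stepMove_self last _ j hl]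
  rw [pvDelGet]
  rw [pvDelGet]
  rw [pvFoldGet pvStepNew (fun v? kr => some (match v? with | some v => pvAddMissing v kr.2 | none => kr.2)) get?_stepNew_ne get?_stepNew_self last cur j hl]
  rw [pvFoldGet pvStepMerge (fun v? kr => some (pvFrontTail (v?.getD []) kr.2)) get?_stepMerge_ne get?_stepMerge_self last cur j hl]
  cases hf : last.find? (fun kr => kr.1 == j) with
  | none => rfl
  | some kr =>
    simp only [Option.map_some, Option.some.injEq]
    set K : (String × Int) → Bool := fun p => !(del.any (fun t => t.1 == j && t.2 == p)) with hK
    -- the value A carries into the reorder phase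
    set a1 : List (String × Int) := (match pvGet? cur j with | some v => pvAddMissing v kr.2 | none => kr.2) with ha1
    set rs : List (String × Int) := kr.2 with hrs
    have hsub : ∀ x ∈ rs, x ∈ a1 := by
      intro x hx
      rw [ha1]
      cases hg : pvGet? cur j
      · simpa using hx
      · simpa [am_mem] using Or.inr hx
    have hfront : (a1.filter K).filter (fun p => !(rs.contains p)) =
        (((pvGet? cur j).getD []).filter (fun p => !(rs.contains p))).filter K := by
      rw [filter_comm']
      congr 1
      rw [ha1]
      cases hg : pvGet? cur j
      · simp only [Option.getD_none]
        apply List.filter_eq_nil_iff.mpr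
        intro x hx
        simp [List.contains_iff_mem, hx]
      · simp only [Option.getD_some]
        exact am_filter rs _
    have htail : (pvDl rs).filter (fun p => (a1.filter K).contains p) = (pvDl rs).filter K := by
      apply List.filter_congr
      intro x hx
      have hxrs : x ∈ rs := (dl_mem rs x).mp hx
      have hxa1 : x ∈ a1 := hsub x hxrs
      by_cases hk : K x = true
      · simp [List.contains_iff_mem, List.mem_filter, hxa1, hk]
      · have hk' : K x = false := by simpa using (Bool.of_not_eq_true hk)
        simp [List.contains_iff_mem, List.mem_filter, hk']
    rw [reorder_eq rs (a1.filter K), hfront, htail]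
    rw [ft_expand, List.filter_append]

-- keys of both results agree, and are nodup
theorem mainKeys (cur last : List (Int × List (String × Int))) (del : List (Int × String × Int)) :
    (manage_static_routes cur last del).map (·.1) = (manage_static_routes_alt cur last del).map (·.1) := by
  unfold manage_static_routes manage_static_routes_alt
  rw [keys_foldMove, keys_foldDel, keys_foldNew, keys_foldDel, keys_foldMerge]

theorem mainNodup (cur last : List (Int × List (String × Int))) (del : List (Int × String × Int))
    (hc : (cur.map (·.1)).Nodup) :
    ((manage_static_routes cur last del).map (·.1)).Nodup := by
  unfold manage_static_routes
  rw [keys_foldMove, keys_foldDel, keys_foldNew]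
  exact nodup_foldKf last _ hc

-- ===== VERDICT (by name: the statement is the Claim_ definition above) =====
theorem manage_static_routes_spec : Claim_equal_manage_static_routes := by
  intro cur last del _ hpre
  unfold Spec_manage_static_routes
  exact pvExt _ _ (mainKeys cur last del) (mainNodup cur last del hpre.1)
    (fun j => mainGet cur last del hpre.2 j)
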